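-- pv_equiv track=rewrite | github.com/cviroulaud/cviroulaud.github.io | terminale/algorithmique/boyer-moore/2021/recherche-textuelle/scripts/boyer-moore-complet.py | set_prefixe
-- ===== SOURCE A (Python) =====
-- def set_prefixe(motif: str) -> list:
--     """
--     longueur du plus long préfixe qui soit aussi
--     suffixe de suffixe
--
--     >>> set_prefixe("abaaaa")
--     [1, 1, 1, 1, 1, 1]
--     """
--     p = [0 for _ in range(len(motif))]
--     # pour chaque suffixe
--     for j in range(1, len(motif)):
--         k = j
--         suffixe = motif[k:]
--         # regarde tous les sous-suffixes
--         while len(suffixe) > 0 and suffixe != motif[:len(suffixe)]: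
--             k += 1
--             suffixe = motif[k:]
--         p[j] = len(suffixe)
--     p[0] = p[1]
--     return p
-- ===== SOURCE B (Python) =====
-- def set_prefixe(motif: str) -> list:
--     n = len(motif)
--     out = []
--     best = n  # smallest index >= current j whose suffix motif[best:] is a prefix of motif
--     for j in range(n - 1, 0, -1):
--         if motif.startswith(motif[j:]):
--             best = j
--         out.append(n - best)
--     out.append(out[-1])
--     out.reverse()
--     return out
-- ===== Notes on version B (the rewrite author's own statement) =====
-- stated objective: faster
-- what changed: Instead of restarting an inner while-loop scan of sub-suffixes for every position j, B makes a single right-to-left pass that maintains the smallest index best >= j whose suffix is a prefix (one startswith test per j) and builds the result back-to-front.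
import Mathlib
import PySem

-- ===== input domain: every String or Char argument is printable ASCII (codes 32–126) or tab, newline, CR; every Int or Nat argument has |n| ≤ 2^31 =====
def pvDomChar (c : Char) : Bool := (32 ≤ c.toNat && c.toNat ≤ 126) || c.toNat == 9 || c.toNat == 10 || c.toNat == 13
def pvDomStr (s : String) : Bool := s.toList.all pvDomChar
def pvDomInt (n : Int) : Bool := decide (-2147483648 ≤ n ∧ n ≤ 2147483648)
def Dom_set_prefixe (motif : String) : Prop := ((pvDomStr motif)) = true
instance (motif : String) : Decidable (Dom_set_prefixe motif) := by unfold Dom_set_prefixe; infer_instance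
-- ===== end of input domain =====

-- B replaces A's per-position inner while-loop rescan by one right-to-left pass that
-- maintains the nearest suffix-that-is-a-prefix position and builds the list back-to-front.

-- ===== PORT A =====
-- the inner while loop: 'while len(suffixe) > 0 and suffixe != motif[:len(suffixe)]: k += 1; suffixe = motif[k:]'
-- (motif[k:] / motif[:m] with natural k, m are exactly drop/take: PySem.List.slice_from_natCast / slice_to_natCast)
def loopA (cs : List Char) (k : Nat) : List Char :=
  let suffixe := cs.drop k
  if h : 0 < suffixe.length ∧ suffixe ≠ cs.take suffixe.length then
    loopA cs (k + 1)
  else suffixe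
termination_by cs.length - k
decreasing_by
  have := h.1
  simp only [suffixe, List.length_drop] at this
  omega

def set_prefixe (motif : String) : List Int :=
  let cs := motif.toList
  let n := cs.length
  -- p = [0 for _ in range(len(motif))]
  let p : List Int := (List.range n).map (fun _ => 0)
  -- for j in range(1, len(motif)): … p[j] = len(suffixe)   (the indices are the naturals 1,…,n-1)
  let p := (List.range' 1 (n - 1)).foldl (fun p j => p.set j (((loopA cs j).length : Int))) p
  -- p[0] = p[1]  (IndexError when len(motif) < 2; those inputs are outside Pre_)
  match PySem.List.pyGet? p 1 with
  | some v => p.set 0 v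
  | none => []

-- ===== PORT B =====
-- 'for j in range(n - 1, 0, -1): …' as a structural countdown from n-1 to 1
def loopB (cs : List Char) (n : Nat) (j : Nat) (best : Nat) (out : List Int) : Nat × List Int :=
  match j with
  | 0 => (best, out)
  | i + 1 =>
    -- if motif.startswith(motif[j:]): best = j
    let best' := if PySem.Chars.startswith cs (cs.drop (i + 1)) then i + 1 else best
    -- out.append(n - best)
    loopB cs n i best' (out ++ [(n : Int) - (best' : Int)])

def set_prefixe_alt (motif : String) : List Int :=
  let cs := motif.toList
  let n := cs.length
  let r := loopB cs n (n - 1) n []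
  let out := r.2
  -- out.append(out[-1])  (IndexError when len(motif) < 2); out.reverse()
  match PySem.List.pyGet? out (-1) with
  | some v => (out ++ [v]).reverse
  | none => []

-- ===== PRECONDITION & SPEC =====
-- Pre_ excludes exactly the strings of length < 2, on which BOTH A and B raise IndexError (p[0] = p[1] / out[-1]).
def Pre_set_prefixe (motif : String) : Prop := 2 ≤ motif.toList.length
instance (motif : String) : Decidable (Pre_set_prefixe motif) := by unfold Pre_set_prefixe; infer_instance
def pvWitness_set_prefixe : String := "ab"

def Spec_set_prefixe (motif : String) (out : List Int) : Prop := out = set_prefixe_alt motif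
instance (motif : String) (out : List Int) : Decidable (Spec_set_prefixe motif out) := by unfold Spec_set_prefixe; infer_instance

-- ===== CLAIM (what is proved, stated in full; the proofs are below) =====
def Claim_equal_set_prefixe : Prop := ∀ (motif : String), Dom_set_prefixe motif → Pre_set_prefixe motif → Spec_set_prefixe motif (set_prefixe motif)

-- ===== LEMMAS AND PROOFS =====

-- the smallest k ≥ j such that motif[k:] is a prefix of motif (k = len always qualifies)
def pvM (cs : List Char) (j : Nat) : Nat :=
  if h : j < cs.length ∧ cs.drop j ≠ cs.take (cs.length - j) then pvM cs (j + 1) else j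
termination_by cs.length - j
decreasing_by omega

lemma pvM_eq (cs : List Char) (j : Nat) :
    pvM cs j = if j < cs.length ∧ cs.drop j ≠ cs.take (cs.length - j) then pvM cs (j + 1) else j := by
  rw [pvM]; split <;> simp_all

lemma pvM_le (cs : List Char) : ∀ j, j ≤ cs.length → pvM cs j ≤ cs.length := by
  intro j
  fun_induction pvM cs j with
  | case1 j h ih => intro _; exact ih (by omega)
  | case2 j h => intro hj; exact hj

lemma loopA_eq (cs : List Char) (k : Nat) : loopA cs k = cs.drop (pvM cs k) := by
  fun_induction loopA cs k with
  | case1 k sfx hcond ih =>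
    have hsfx : sfx = cs.drop k := rfl
    rw [pvM_eq]
    have hc : k < cs.length ∧ cs.drop k ≠ cs.take (cs.length - k) := by
      obtain ⟨h1, h2⟩ := hcond
      rw [hsfx, List.length_drop] at h1 h2
      exact ⟨by omega, h2⟩
    rw [if_pos hc]
    exact ih
  | case2 k sfx hcond =>
    have hsfx : sfx = cs.drop k := rfl
    rw [pvM_eq]
    have hc : ¬ (k < cs.length ∧ cs.drop k ≠ cs.take (cs.length - k)) := by
      intro ⟨h1, h2⟩
      apply hcond
      rw [hsfx, List.length_drop]
      exact ⟨by omega, h2⟩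
    rw [if_neg hc]

lemma startswith_drop_iff (cs : List Char) (j : Nat) :
    PySem.Chars.startswith cs (cs.drop j) = true ↔ cs.drop j = cs.take (cs.length - j) := by
  rw [PySem.Chars.startswith_iff]
  constructor
  · intro h
    have := List.prefix_iff_eq_take.mp h
    simpa [List.length_drop] using this
  · intro h
    apply List.prefix_iff_eq_take.mpr
    simpa [List.length_drop] using h

lemma pvM_step (cs : List Char) (j : Nat) (hj : j + 1 ≤ cs.length) :
    pvM cs (j + 1) = if PySem.Chars.startswith cs (cs.drop (j + 1)) then j + 1 else pvM cs (j + 2) := by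
  by_cases hs : PySem.Chars.startswith cs (cs.drop (j + 1)) = true
  · rw [if_pos hs, pvM_eq]
    have hd := (startswith_drop_iff cs (j + 1)).mp hs
    rw [if_neg (by intro ⟨_, h2⟩; exact h2 hd)]
  · rw [if_neg hs, pvM_eq]
    have hne : cs.drop (j + 1) ≠ cs.take (cs.length - (j + 1)) := by
      intro h; exact hs ((startswith_drop_iff cs (j + 1)).mpr h)
    by_cases hlt : j + 1 < cs.length
    · rw [if_pos ⟨hlt, hne⟩]
    · exfalso
      apply hne
      have he : j + 1 = cs.length := by omega
      simp [he]

lemma loopB_eq (cs : List Char) : ∀ j, j < cs.length → ∀ out,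
    loopB cs cs.length j (pvM cs (j + 1)) out =
      (pvM cs 1, out ++ ((List.range' 1 j).map (fun i => ((cs.length : Int) - (pvM cs i : Int)))).reverse) := by
  intro j
  induction j with
  | zero => intro _ out; simp [loopB]
  | succ i ih =>
    intro hj out
    rw [loopB]
    have hb : (if PySem.Chars.startswith cs (cs.drop (i + 1)) then i + 1 else pvM cs (i + 2)) = pvM cs (i + 1) :=
      (pvM_step cs i (by omega)).symm
    simp only [hb]
    rw [ih (by omega)]
    have hr : List.range' 1 (i + 1) = List.range' 1 i ++ [i + 1] := by
      rw [List.range'_concat]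
      simp [Nat.add_comm]
    rw [hr]
    simp [List.append_assoc]

lemma map_loopA_len (cs : List Char) (l : List Nat) (hl : ∀ j ∈ l, j ≤ cs.length) :
    l.map (fun j => (((loopA cs j).length : Int))) =
      l.map (fun i => ((cs.length : Int) - (pvM cs i : Int))) := by
  apply List.map_congr_left
  intro j hj
  rw [loopA_eq]
  have h1 : pvM cs j ≤ cs.length := pvM_le cs j (hl j hj)
  simp only [List.length_drop]
  omega

lemma foldl_set_range' (g : Nat → Int) :
    ∀ (m a : Nat) (p0 : List Int), a + m ≤ p0.length →
    (List.range' a m).foldl (fun p j => p.set j (g j)) p0 =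
      p0.take a ++ (List.range' a m).map g ++ p0.drop (a + m) := by
  intro m
  induction m with
  | zero => intro a p0 _; simp
  | succ m ih =>
    intro a p0 hlen
    rw [List.range'_succ]
    simp only [List.foldl_cons, List.map_cons]
    rw [ih (a + 1) (p0.set a (g a)) (by simp; omega)]
    have ha : a < p0.length := by omega
    have hset : p0.set a (g a) = (p0.take a ++ [g a]) ++ p0.drop (a + 1) := by
      rw [List.set_eq_take_append_cons_drop, if_pos ha]
      simp
    have hlen' : (p0.take a ++ [g a]).length = a + 1 := by
      simp; omega
    have h3 : (p0.set a (g a)).take (a + 1) = p0.take a ++ [g a] := by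
      rw [hset, List.take_left' hlen']
    have h4 : (p0.set a (g a)).drop (a + 1 + m) = p0.drop (a + (m + 1)) := by
      rw [List.drop_set_of_lt (by omega : a < a + 1 + m)]
      congr 1
      omega
    rw [h3, h4]
    simp [List.append_assoc]

-- ===== VERDICT (by name: the statement is the Claim_ definition above) =====
theorem set_prefixe_spec : Claim_equal_set_prefixe := by
  intro motif _ hpre
  have hn : 2 ≤ motif.toList.length := hpre
  show set_prefixe motif = set_prefixe_alt motif
  simp only [set_prefixe, set_prefixe_alt]
  set cs := motif.toList with hcs
  have hl : List.range' 1 (cs.length - 1) = 1 :: List.range' 2 (cs.length - 2) := by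
    have h2 : cs.length - 1 = (cs.length - 2) + 1 := by omega
    rw [h2, List.range'_succ]
  -- A side: materialise the written array
  have h0 : (List.range cs.length).map (fun _ => (0 : Int)) = List.replicate cs.length 0 := by
    simp [List.map_const']
  have e1 : (List.replicate cs.length (0 : Int)).take 1 = [0] := by
    rw [List.take_replicate]
    have : min 1 cs.length = 1 := by omega
    rw [this]
    rfl
  have e2 : (List.replicate cs.length (0 : Int)).drop (1 + (cs.length - 1)) = [] := by
    apply List.drop_eq_nil_of_le
    simp
    omega
  -- B side: the countdown loop
  have hstart : pvM cs cs.length = cs.length := by rw [pvM_eq]; simp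
  have h1n : cs.length - 1 + 1 = cs.length := by omega
  have hLB := loopB_eq cs (cs.length - 1) (by omega) []
  rw [h1n, hstart] at hLB
  rw [h0, foldl_set_range' (fun j => (((loopA cs j).length : Int))) (cs.length - 1) 1
        (List.replicate cs.length 0) (by simp; omega),
      e1, e2,
      map_loopA_len cs _ (by intro j hj; rw [List.mem_range'_1] at hj; omega),
      hLB, hl]
  simp only [List.map_cons, List.reverse_cons, List.nil_append, List.append_nil,
    List.singleton_append]
  have hg1 : ∀ (x y : Int) (R : List Int), PySem.List.pyGet? (x :: y :: R) 1 = some y := by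
    intro x y R
    have h1 : (1 : Int) = ((1 : Nat) : Int) := by norm_num
    rw [h1, PySem.List.pyGet?_natCast]
    simp
  rw [hg1, PySem.List.pyGet?_neg_one_append_singleton]
  simp [List.reverse_append]
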